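-- pv_equiv track=rewrite | github.com/DevExpress/metric_toolbox | utils/sqlite_query_formatters.py | _json_object
-- ===== SOURCE A (Python) =====
-- from collections.abc import Sequence
-- import itertools
-- import math
--
-- def _json_object(fields: Sequence[str]) -> tuple[int, str]:
--     SQLITE_MAX_FUNCTION_ARG = 63
--     parts = math.ceil(len(fields) / SQLITE_MAX_FUNCTION_ARG)
--
--     def gen():
--         for i in range(parts):
--             start = i * SQLITE_MAX_FUNCTION_ARG
--             cols = ',\n\t'.join(f"'{v}', {v}" for v in itertools.islice(fields, start, start + SQLITE_MAX_FUNCTION_ARG))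
--             yield f'JSON_OBJECT(\n\t{cols})'
--
--     json_obj_fn = ',\n\t'.join(gen())
--     if parts > 1:
--         return f'JSON_PATCH(\n\t{json_obj_fn})'
--     return json_obj_fn
-- ===== SOURCE B (Python) =====
-- def _json_object(fields):
--     SQLITE_MAX_FUNCTION_ARG = 63
--     objs = []
--     current = []
--     for v in fields:
--         current.append(f"'{v}', {v}")
--         if len(current) == SQLITE_MAX_FUNCTION_ARG:
--             objs.append('JSON_OBJECT(\n\t' + ',\n\t'.join(current) + ')')
--             current = []
--     if current:
--         objs.append('JSON_OBJECT(\n\t' + ',\n\t'.join(current) + ')')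
--     joined = ',\n\t'.join(objs)
--     return f'JSON_PATCH(\n\t{joined})' if len(objs) > 1 else joined
-- ===== Notes on version B (the rewrite author's own statement) =====
-- stated objective: faster
-- what changed: B replaces A's precomputed ceil part count with range-indexed islice slicing by a single streaming pass over fields that buffers formatted columns and flushes a JSON_OBJECT every 63 fields, wrapping in JSON_PATCH when more than one object was emitted; each islice in A re-scans the sequence from index 0, so A's total scanning is quadratic while B touches each field once.
import Mathlib
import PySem

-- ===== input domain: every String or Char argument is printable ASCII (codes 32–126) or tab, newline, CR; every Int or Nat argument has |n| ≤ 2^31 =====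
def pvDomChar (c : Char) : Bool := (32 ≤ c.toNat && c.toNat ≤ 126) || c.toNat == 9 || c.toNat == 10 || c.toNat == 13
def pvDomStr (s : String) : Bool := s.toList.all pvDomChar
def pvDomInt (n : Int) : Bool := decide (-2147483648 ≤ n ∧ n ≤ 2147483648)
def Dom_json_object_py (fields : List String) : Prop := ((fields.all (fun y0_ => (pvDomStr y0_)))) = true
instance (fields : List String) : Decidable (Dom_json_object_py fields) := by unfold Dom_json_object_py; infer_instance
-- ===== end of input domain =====

-- B is a single streaming pass with an accumulator buffer flushed every 63 fields,
-- replacing A's precomputed ceil part count and per-part islice re-scans. Objective: alternative decomposition.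

-- ===== PORT A =====
-- f"'{v}', {v}"
def pvFmtA (v : String) : String := "'" ++ v ++ "', " ++ v

def json_object_py (fields : List String) : String :=
  -- parts = math.ceil(len(fields) / 63); exact on Nat as (len + 62) / 63
  let parts : Nat := (fields.length + 62) / 63
  -- gen(): for i in range(parts): islice(fields, 63*i, 63*i + 63), format each, join, wrap
  let objs : List String :=
    (List.range parts).map (fun i =>
      "JSON_OBJECT(\n\t" ++
        PySem.Str.join ",\n\t" (((fields.drop (i * 63)).take 63).map pvFmtA) ++ ")")
  let json_obj_fn := PySem.Str.join ",\n\t" objs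
  if parts > 1 then "JSON_PATCH(\n\t" ++ json_obj_fn ++ ")" else json_obj_fn

-- ===== PORT B =====
def pvFmtB (v : String) : String := "'" ++ v ++ "', " ++ v

def pvObjB (chunk : List String) : String :=
  "JSON_OBJECT(\n\t" ++ PySem.Str.join ",\n\t" chunk ++ ")"

-- one loop iteration: append the formatted field to the buffer; flush at 63
def pvStepB (s : List String × List String) (v : String) : List String × List String :=
  let cur := s.2 ++ [pvFmtB v]
  if cur.length = 63 then (s.1 ++ [pvObjB cur], []) else (s.1, cur)

def json_object_py_alt (fields : List String) : String :=
  let s := fields.foldl pvStepB ([], [])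
  let objs := if s.2.isEmpty then s.1 else s.1 ++ [pvObjB s.2]
  let joined := PySem.Str.join ",\n\t" objs
  if objs.length > 1 then "JSON_PATCH(\n\t" ++ joined ++ ")" else joined

-- ===== PRECONDITION & SPEC =====
def Spec_json_object_py (fields : List String) (out : String) : Prop := out = json_object_py_alt fields
instance (fields : List String) (out : String) : Decidable (Spec_json_object_py fields out) := by unfold Spec_json_object_py; infer_instance

-- ===== CLAIM (what is proved, stated in full; the proofs are below) =====
def Claim_equal_json_object_py : Prop := ∀ (fields : List String), Dom_json_object_py fields → Spec_json_object_py fields (json_object_py fields)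

-- ===== LEMMAS AND PROOFS =====

-- proof-side: greedy 63-chunking of a list
def pvChunks63 (l : List String) : List (List String) :=
  if l = [] then [] else l.take 63 :: pvChunks63 (l.drop 63)
termination_by l.length
decreasing_by
  rename_i h
  have : l.length ≠ 0 := fun h0 => h (List.eq_nil_of_length_eq_zero h0)
  simp [List.length_drop]; omega

lemma pvChunks63_nil : pvChunks63 [] = [] := by simp [pvChunks63]

lemma pvChunks63_of_ne (l : List String) (h : l ≠ []) :
    pvChunks63 l = l.take 63 :: pvChunks63 (l.drop 63) := by
  rw [pvChunks63]; simp [h]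

-- A's range-indexed slicing equals greedy chunking
lemma rangeChunks : ∀ (n : Nat) (l : List String), l.length ≤ n →
    (List.range ((l.length + 62) / 63)).map (fun i => (l.drop (i * 63)).take 63)
      = pvChunks63 l := by
  intro n
  induction n with
  | zero =>
      intro l hl
      have : l = [] := List.eq_nil_of_length_eq_zero (Nat.le_zero.mp hl)
      subst this; simp [pvChunks63_nil]
  | succ n ih =>
      intro l hl
      by_cases hne : l = []
      · subst hne; simp [pvChunks63_nil]
      · have hpos : 1 ≤ l.length := List.length_pos_iff.mpr hne
        have hk : (l.length + 62) / 63 = (l.length - 63 + 62) / 63 + 1 := by omega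
        rw [hk, List.range_succ_eq_map, List.map_cons, List.map_map]
        rw [pvChunks63_of_ne l hne]
        have ih' := ih (l.drop 63) (by simp only [List.length_drop]; omega)
        simp only [List.length_drop] at ih'
        rw [← ih']
        congr 1
        refine List.map_congr_left (fun i _ => ?_)
        simp only [Function.comp_def]
        rw [List.drop_drop]
        congr 2
        omega

-- B's fold invariant: buffering-and-flushing produces exactly the greedy chunks
lemma foldInv : ∀ (fs : List String) (objs cur : List String), cur.length < 63 →
    (let s := fs.foldl pvStepB (objs, cur);
     if s.2.isEmpty then s.1 else s.1 ++ [pvObjB s.2])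
      = objs ++ (pvChunks63 (cur ++ fs.map pvFmtB)).map pvObjB := by
  intro fs
  induction fs with
  | nil =>
      intro objs cur hcur
      simp only [List.foldl_nil, List.map_nil, List.append_nil]
      rcases List.eq_nil_or_concat cur with h | h
      · subst h; simp [pvChunks63_nil]
      · have hne : cur ≠ [] := by rcases h with ⟨a, b, rfl⟩; simp
        rw [pvChunks63_of_ne cur hne]
        have ht : cur.take 63 = cur := List.take_of_length_le (by omega)
        have hd : cur.drop 63 = [] := List.drop_eq_nil_of_le (by omega)
        simp [hne, ht, hd, pvChunks63_nil]
  | cons f rest ih =>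
      intro objs cur hcur
      simp only [List.foldl_cons, List.map_cons]
      have hjoin : cur ++ pvFmtB f :: rest.map pvFmtB
          = (cur ++ [pvFmtB f]) ++ rest.map pvFmtB := by simp
      rw [hjoin]
      by_cases h63 : (cur ++ [pvFmtB f]).length = 63
      · have hstep : pvStepB (objs, cur) f = (objs ++ [pvObjB (cur ++ [pvFmtB f])], []) := by
          simp [pvStepB, h63]
        rw [hstep, ih (objs ++ [pvObjB (cur ++ [pvFmtB f])]) [] (by simp)]
        have hne : (cur ++ [pvFmtB f]) ++ rest.map pvFmtB ≠ [] := by simp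
        rw [pvChunks63_of_ne _ hne]
        have ht : ((cur ++ [pvFmtB f]) ++ rest.map pvFmtB).take 63 = cur ++ [pvFmtB f] := by
          rw [← h63]; exact List.take_left
        have hd : ((cur ++ [pvFmtB f]) ++ rest.map pvFmtB).drop 63 = rest.map pvFmtB := by
          rw [← h63]; exact List.drop_left
        rw [ht, hd]; simp
      · have hstep : pvStepB (objs, cur) f = (objs, cur ++ [pvFmtB f]) := by
          simp only [pvStepB]; rw [if_neg h63]
        rw [hstep]
        have hlen : (cur ++ [pvFmtB f]).length < 63 := by
          simp only [List.length_append, List.length_cons, List.length_nil] at h63 ⊢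
          omega
        exact ih objs (cur ++ [pvFmtB f]) hlen

-- ===== VERDICT (by name: the statement is the Claim_ definition above) =====
theorem json_object_py_spec : Claim_equal_json_object_py := by
  intro fields _
  unfold Spec_json_object_py json_object_py json_object_py_alt
  have hB := foldInv fields [] [] (by simp)
  simp only [List.nil_append] at hB
  simp only [hB]
  have hA : (List.range ((fields.length + 62) / 63)).map (fun i =>
        "JSON_OBJECT(\n\t" ++
          PySem.Str.join ",\n\t" (((fields.drop (i * 63)).take 63).map pvFmtA) ++ ")")
      = (pvChunks63 (fields.map pvFmtB)).map pvObjB := by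
    rw [← rangeChunks fields.length (fields.map pvFmtB) (by simp)]
    simp only [List.length_map, List.map_map]
    refine List.map_congr_left (fun i _ => ?_)
    rw [show pvFmtA = pvFmtB from rfl]
    simp [pvObjB, List.map_take, List.map_drop]
  rw [hA]
  have hlen : (fields.length + 62) / 63 = ((pvChunks63 (fields.map pvFmtB)).map pvObjB).length := by
    rw [← hA]; simp
  rw [hlen]
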